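-- pv_equiv track=rewrite | github.com/sixtusDev/data-structure-and-algorithm | problems/find_max_in_bitonic.py | find_max_in_bitonic
-- ===== SOURCE A (Python) =====
-- def find_max_in_bitonic(arr):
--     left = 0
--     right = len(arr) - 1
--
--     while left < right:
--         mid = (left + right) // 2
--
--         if arr[mid] > arr[mid + 1]:
--             right = mid
--         else:
--             left = mid + 1
--
--     return arr[left]
-- ===== SOURCE B (Python) =====
-- def find_max_in_bitonic(arr):
--     def go(left, right):
--         if left == right:
--             return arr[left]
--         mid = (left + right) // 2
--         if arr[mid] > arr[mid + 1]:
--             return go(left, mid)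
--         return go(mid + 1, right)
--     return go(0, len(arr) - 1)
-- ===== Notes on version B (the rewrite author's own statement) =====
-- stated objective: alternative
-- what changed: The iterative while-loop binary search is rewritten as a recursive divide-and-conquer helper go(left, right) with a left==right base case.
import Mathlib
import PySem

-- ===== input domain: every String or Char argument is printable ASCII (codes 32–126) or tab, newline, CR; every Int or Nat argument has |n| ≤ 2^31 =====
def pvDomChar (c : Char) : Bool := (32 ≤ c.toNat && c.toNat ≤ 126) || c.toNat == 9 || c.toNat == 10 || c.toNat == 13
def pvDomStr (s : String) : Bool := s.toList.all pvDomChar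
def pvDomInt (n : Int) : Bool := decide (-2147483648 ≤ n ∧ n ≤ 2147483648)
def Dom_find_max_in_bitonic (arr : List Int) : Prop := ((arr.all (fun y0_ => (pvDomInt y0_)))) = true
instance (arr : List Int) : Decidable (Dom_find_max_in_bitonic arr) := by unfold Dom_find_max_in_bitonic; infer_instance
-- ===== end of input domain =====

-- B replaces A's iterative while-loop binary search by a recursive divide-and-conquer
-- helper go(left, right); same decisions, return values equal on every nonempty list.

-- indexing helper: Python arr[i]; every index either port reads is in range whenever
-- arr ≠ [] (0 ≤ left ≤ mid < mid+1 ≤ right ≤ len-1), so the .getD 0 default is never used on Pre_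
def pvAt (arr : List Int) (i : Int) : Int := (PySem.List.pyGet? arr i).getD 0

-- midpoint bound used by the loop's termination measure
theorem pvMid_lt {l r : Int} (h : l < r) : PySem.Int.floordiv (l + r) 2 < r := by
  rw [PySem.Int.floordiv_lt_iff_lt_mul (by omega)]; omega

theorem pvMid_ge {l r : Int} (h : l < r) : l ≤ PySem.Int.floordiv (l + r) 2 := by
  rw [PySem.Int.le_floordiv_iff_mul_le (by omega)]; omega

-- ===== PORT A =====
-- the while-loop of A, state (left, right)
def findA_loop (arr : List Int) (left right : Int) : Int :=
  if h : left < right then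
    let mid := PySem.Int.floordiv (left + right) 2
    if pvAt arr mid > pvAt arr (mid + 1) then findA_loop arr left mid
    else findA_loop arr (mid + 1) right
  else pvAt arr left
termination_by (right - left).toNat
decreasing_by
  · have h1 := pvMid_lt h; omega
  · have h1 := pvMid_lt h; have h2 := pvMid_ge h; omega

def find_max_in_bitonic (arr : List Int) : Int :=
  findA_loop arr 0 ((arr.length : Int) - 1)

-- ===== PORT B =====
-- go(left, right) from Source B; fuel only makes the recursion total in Lean
-- (depth is < arr.length on every input admitted by Pre_)
def goB (arr : List Int) : Nat → Int → Int → Int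
  | 0, left, _ => pvAt arr left
  | fuel + 1, left, right =>
    if left == right then pvAt arr left
    else
      let mid := PySem.Int.floordiv (left + right) 2
      if pvAt arr mid > pvAt arr (mid + 1) then goB arr fuel left mid
      else goB arr fuel (mid + 1) right

def find_max_in_bitonic_alt (arr : List Int) : Int :=
  goB arr arr.length 0 ((arr.length : Int) - 1)

-- ===== PRECONDITION & SPEC =====
-- Pre_ excludes only the empty list, on which both A and B raise IndexError (arr[0] / arr[-1])
def Pre_find_max_in_bitonic (arr : List Int) : Prop := arr ≠ []
instance (arr : List Int) : Decidable (Pre_find_max_in_bitonic arr) := by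
  unfold Pre_find_max_in_bitonic; infer_instance

def pvWitness_find_max_in_bitonic : List Int := [1, 5, 3]

def Spec_find_max_in_bitonic (arr : List Int) (out : Int) : Prop := out = find_max_in_bitonic_alt arr
instance (arr : List Int) (out : Int) : Decidable (Spec_find_max_in_bitonic arr out) := by
  unfold Spec_find_max_in_bitonic; infer_instance

-- ===== CLAIM (what is proved, stated in full; the proofs are below) =====
def Claim_equal_find_max_in_bitonic : Prop := ∀ (arr : List Int), Dom_find_max_in_bitonic arr → Pre_find_max_in_bitonic arr → Spec_find_max_in_bitonic arr (find_max_in_bitonic arr)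

-- ===== LEMMAS AND PROOFS =====
-- the loop and the recursion take identical decisions, step for step
theorem loop_eq_go (arr : List Int) :
    ∀ (fuel : Nat) (l r : Int), l ≤ r → (r - l).toNat < fuel →
      findA_loop arr l r = goB arr fuel l r := by
  intro fuel
  induction fuel with
  | zero => intro l r _ hf; omega
  | succ f ih =>
    intro l r hle hf
    rw [findA_loop, goB]
    by_cases heq : l = r
    · simp [heq]
    · have hlt : l < r := lt_of_le_of_ne hle heq
      have h1 := pvMid_lt hlt; have h2 := pvMid_ge hlt
      simp only [heq, beq_iff_eq, dif_pos hlt]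
      split
      · exact ih l _ (by omega) (by omega)
      · exact ih _ r (by omega) (by omega)

-- ===== VERDICT (by name: the statement is the Claim_ definition above) =====
theorem find_max_in_bitonic_spec : Claim_equal_find_max_in_bitonic := by
  intro arr _ hpre
  have hlen : 1 ≤ arr.length := by
    cases arr with
    | nil => exact absurd rfl hpre
    | cons a t => simp
  unfold Spec_find_max_in_bitonic find_max_in_bitonic find_max_in_bitonic_alt
  exact loop_eq_go arr arr.length 0 _ (by omega) (by omega)
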